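-- pv_equiv track=rewrite | github.com/ketraline/python-course | 2025/11.04/zadania.py | piatkichecker
-- ===== SOURCE A (Python) =====
-- def piatkichecker(lista):
--     lista.sort()
--     piatki = []
--     for a in range(len(lista)):
--         for b in range(a+1, len(lista)):
--             if lista[b]%lista[a] == 0:
--                 for c in range(b+1, len(lista)):
--                     if lista[c]%lista[b] == 0:
--                         for d in range(c+1, len(lista)):
--                             if lista[d]%lista[c] == 0:
--                                 for e in range(d+1, len(lista)):
--                                     if lista[e]%lista[d] == 0:
--                                         piatki.append([lista[a],lista[b],lista[c],lista[d],lista[e]])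
--     return piatki
-- ===== SOURCE B (Python) =====
-- def piatkichecker(lista):
--     lista.sort()
--     n = len(lista)
--     # adjacency: for each index i, the later indices holding a multiple of lista[i]
--     nxt = [[j for j in range(i + 1, n) if lista[j] % lista[i] == 0] for i in range(n)]
--     out = []
--
--     def dfs(i, chain):
--         if len(chain) == 5:
--             out.append([lista[k] for k in chain])
--             return
--         for j in nxt[i]:
--             dfs(j, chain + [j])
--
--     for i in range(n):
--         dfs(i, [i])
--     return out
-- ===== Notes on version B (the rewrite author's own statement) =====
-- stated objective: alternative
-- what changed: Replaces the five hard-coded nested index loops by a precomputed per-index multiple-adjacency list plus a depth-5 DFS that only walks actual multiples, pruning dead branches instead of rescanning the whole suffix at every level.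
import Mathlib
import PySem

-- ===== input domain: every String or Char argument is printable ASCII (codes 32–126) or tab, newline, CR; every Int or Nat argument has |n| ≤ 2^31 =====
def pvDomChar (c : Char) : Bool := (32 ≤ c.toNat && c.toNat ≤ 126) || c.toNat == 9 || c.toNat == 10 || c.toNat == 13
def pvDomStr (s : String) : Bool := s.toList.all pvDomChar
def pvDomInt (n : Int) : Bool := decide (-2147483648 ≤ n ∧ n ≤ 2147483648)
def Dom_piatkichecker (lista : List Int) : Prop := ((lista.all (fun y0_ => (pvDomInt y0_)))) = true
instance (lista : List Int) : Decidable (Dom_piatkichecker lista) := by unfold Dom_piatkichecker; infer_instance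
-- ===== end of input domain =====

-- B replaces A's five nested suffix scans by a precomputed multiple-adjacency list and a
-- depth-5 DFS over actual multiples (objective: alternative algorithm, prunes dead branches).
-- Both Pythons sort `lista` IN PLACE; the equivalence proved here is about the return value.

-- ===== PORT A =====
-- range(a+1, len) over Nat indices from range(len) is exactly List.range' (a+1) (n-(a+1));
-- indices are always in range there, so List.getD is exact for lista[i]; % is PySem.Int.mod.
def piatkichecker (lista : List Int) : List (List Int) :=
  let s := PySem.List.sorted lista (fun x => x) false
  let n := s.length
  (List.range n).foldl (fun acc a =>
    (List.range' (a+1) (n-(a+1))).foldl (fun acc b =>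
      if PySem.Int.mod (s.getD b 0) (s.getD a 0) = 0 then
        (List.range' (b+1) (n-(b+1))).foldl (fun acc c =>
          if PySem.Int.mod (s.getD c 0) (s.getD b 0) = 0 then
            (List.range' (c+1) (n-(c+1))).foldl (fun acc d =>
              if PySem.Int.mod (s.getD d 0) (s.getD c 0) = 0 then
                (List.range' (d+1) (n-(d+1))).foldl (fun acc e =>
                  if PySem.Int.mod (s.getD e 0) (s.getD d 0) = 0 then
                    acc ++ [[s.getD a 0, s.getD b 0, s.getD c 0, s.getD d 0, s.getD e 0]]
                  else acc) acc
              else acc) acc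
          else acc) acc
      else acc) acc) []

-- ===== PORT B =====
-- dfs carries the remaining recursion depth (5 - len(chain)) as explicit fuel.
def pvDfsB (s : List Int) (nxt : List (List Nat)) :
    Nat → Nat → List Nat → List (List Int) → List (List Int)
  | 0, _, chain, out => out ++ [chain.map (fun k => s.getD k 0)]
  | fuel+1, i, chain, out =>
      (nxt.getD i []).foldl (fun out j => pvDfsB s nxt fuel j (chain ++ [j]) out) out

def piatkichecker_alt (lista : List Int) : List (List Int) :=
  let s := PySem.List.sorted lista (fun x => x) false
  let n := s.length
  let nxt := (List.range n).map (fun i =>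
    (List.range' (i+1) (n-(i+1))).filter (fun j => PySem.Int.mod (s.getD j 0) (s.getD i 0) = 0))
  (List.range n).foldl (fun out i => pvDfsB s nxt 4 i [i] out) []

-- ===== PRECONDITION & SPEC =====
-- Pre_ excludes exactly the inputs on which Python A (and Python B alike) raises
-- ZeroDivisionError: a 0 in the list that is not the unique maximum after sorting.
def Pre_piatkichecker (lista : List Int) : Prop :=
  (0 : Int) ∉ lista ∨ (lista.count 0 = 1 ∧ ∀ x ∈ lista, x ≤ 0)
instance (lista : List Int) : Decidable (Pre_piatkichecker lista) := by
  unfold Pre_piatkichecker; infer_instance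
def pvWitness_piatkichecker : List Int := [1, 2, 4, 8, 16]

def Spec_piatkichecker (lista : List Int) (out : List (List Int)) : Prop :=
  out = piatkichecker_alt lista
instance (lista : List Int) (out : List (List Int)) : Decidable (Spec_piatkichecker lista out) := by
  unfold Spec_piatkichecker; infer_instance

-- ===== CLAIM (what is proved, stated in full; the proofs are below) =====
def Claim_equal_piatkichecker : Prop :=
  ∀ (lista : List Int), Dom_piatkichecker lista → Pre_piatkichecker lista →
    Spec_piatkichecker lista (piatkichecker lista)

-- ===== LEMMAS AND PROOFS =====

theorem pv_getD_map_range {α : Type} (f : Nat → α) (n i : Nat) (hi : i < n) (d : α) :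
    ((List.range n).map f).getD i d = f i := by
  rw [List.getD_eq_getElem?_getD, List.getElem?_map, List.getElem?_range hi]
  rfl

-- one DFS level (fuel k+1) from index i equals a guarded foldl over the suffix range,
-- with the recursive call at fuel k
theorem pv_dfs_level (s : List Int) (nxt : List (List Nat)) (n k i : Nat) (hi : i < n)
    (hn : nxt = (List.range n).map (fun i =>
      (List.range' (i+1) (n-(i+1))).filter (fun j => PySem.Int.mod (s.getD j 0) (s.getD i 0) = 0)))
    (chain : List Nat) (out : List (List Int)) :
    pvDfsB s nxt (k+1) i chain out =
      (List.range' (i+1) (n-(i+1))).foldl (fun out j =>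
        if PySem.Int.mod (s.getD j 0) (s.getD i 0) = 0 then
          pvDfsB s nxt k j (chain ++ [j]) out
        else out) out := by
  rw [pvDfsB, hn, pv_getD_map_range _ n i hi,
    ← PySem.List.foldl_ite_eq_foldl_filter]

theorem pv_main (s : List Int) :
    (List.range s.length).foldl (fun acc a =>
      (List.range' (a+1) (s.length-(a+1))).foldl (fun acc b =>
        if PySem.Int.mod (s.getD b 0) (s.getD a 0) = 0 then
          (List.range' (b+1) (s.length-(b+1))).foldl (fun acc c =>
            if PySem.Int.mod (s.getD c 0) (s.getD b 0) = 0 then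
              (List.range' (c+1) (s.length-(c+1))).foldl (fun acc d =>
                if PySem.Int.mod (s.getD d 0) (s.getD c 0) = 0 then
                  (List.range' (d+1) (s.length-(d+1))).foldl (fun acc e =>
                    if PySem.Int.mod (s.getD e 0) (s.getD d 0) = 0 then
                      acc ++ [[s.getD a 0, s.getD b 0, s.getD c 0, s.getD d 0, s.getD e 0]]
                    else acc) acc
                else acc) acc
            else acc) acc
        else acc) acc) [] =
    (List.range s.length).foldl (fun out i =>
      pvDfsB s ((List.range s.length).map (fun i =>
        (List.range' (i+1) (s.length-(i+1))).filter
          (fun j => PySem.Int.mod (s.getD j 0) (s.getD i 0) = 0))) 4 i [i] out) [] := by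
  set n := s.length with hnl
  set nxt := (List.range n).map (fun i =>
    (List.range' (i+1) (n-(i+1))).filter (fun j => PySem.Int.mod (s.getD j 0) (s.getD i 0) = 0))
    with hn
  symm
  refine PySem.List.foldl_congr_mem _ _ _ _ ?_
  intro acc a ha
  have ha' : a < n := List.mem_range.mp ha
  rw [pv_dfs_level s nxt n 3 a ha' hn]
  refine PySem.List.foldl_congr_mem _ _ _ _ ?_
  intro acc b hb
  have hb' : b < n := by
    have := List.mem_range'.mp hb; omega
  split_ifs with h1
  · rw [pv_dfs_level s nxt n 2 b hb' hn]
    refine PySem.List.foldl_congr_mem _ _ _ _ ?_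
    intro acc c hc
    have hc' : c < n := by have := List.mem_range'.mp hc; omega
    split_ifs with h2
    · rw [pv_dfs_level s nxt n 1 c hc' hn]
      refine PySem.List.foldl_congr_mem _ _ _ _ ?_
      intro acc d hd
      have hd' : d < n := by have := List.mem_range'.mp hd; omega
      split_ifs with h3
      · rw [pv_dfs_level s nxt n 0 d hd' hn]
        refine PySem.List.foldl_congr_mem _ _ _ _ ?_
        intro acc e he
        split_ifs with h4
        · rw [pvDfsB]; simp
        · rfl
      · rfl
    · rfl
  · rfl

-- ===== VERDICT (by name: the statement is the Claim_ definition above) =====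
theorem piatkichecker_spec : Claim_equal_piatkichecker := by
  intro lista _ _
  exact pv_main (PySem.List.sorted lista (fun x => x) false)
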